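-- pv_equiv track=rewrite | github.com/cafaray/atco.de-fights | replaceAllDigitsRegExp.py | replaceAllDigitsRegExp
-- ===== SOURCE A (Python) =====
-- def replaceAllDigitsRegExp(input):
--     r = ''
--     ready = False
--     for c in input:
--         if c>='0' and c<='9' and not ready:
--             r+='#'
--             ready = True
--         else:
--             r+=c
--     return r
-- ===== SOURCE B (Python) =====
-- def replaceAllDigitsRegExp(input):
--     for i, c in enumerate(input):
--         if '0' <= c <= '9':
--             return input[:i] + '#' + input[i+1:]
--     return input
-- ===== Notes on version B (the rewrite author's own statement) =====
-- stated objective: simpler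
-- what changed: B locates the index of the first ASCII digit with an early-returning scan and splices the replacement character in with slicing, instead of rebuilding the whole string character by character under a boolean flag.
import Mathlib
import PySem

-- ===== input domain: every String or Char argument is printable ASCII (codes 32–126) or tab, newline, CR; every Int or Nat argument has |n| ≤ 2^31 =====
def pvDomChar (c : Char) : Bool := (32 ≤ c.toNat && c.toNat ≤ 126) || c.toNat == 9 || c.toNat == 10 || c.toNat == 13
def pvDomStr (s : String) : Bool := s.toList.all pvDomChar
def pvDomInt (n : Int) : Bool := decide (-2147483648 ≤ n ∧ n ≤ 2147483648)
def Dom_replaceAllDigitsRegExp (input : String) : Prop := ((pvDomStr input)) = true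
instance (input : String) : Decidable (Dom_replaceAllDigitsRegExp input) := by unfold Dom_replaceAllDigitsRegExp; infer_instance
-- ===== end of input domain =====

-- B replaces the single accumulating pass with a locate-the-first-digit scan plus a splice (simpler decomposition; same O(n) cost).

-- ===== PORT A =====
-- the loop body: state (r, ready), one character at a time
def pvStepA (st : List Char × Bool) (c : Char) : List Char × Bool :=
  if '0' ≤ c ∧ c ≤ '9' ∧ st.2 = false then (st.1 ++ ['#'], true) else (st.1 ++ [c], st.2)

def replaceAllDigitsRegExp (input : String) : String :=
  String.ofList (input.toList.foldl pvStepA ([], false)).1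

-- ===== PORT B =====
-- index of the first ASCII digit, if any (the early-returning enumerate scan)
def pvFirstDigitIdx : List Char → Option Nat
  | [] => none
  | c :: cs => if '0' ≤ c ∧ c ≤ '9' then some 0 else (pvFirstDigitIdx cs).map (· + 1)

def replaceAllDigitsRegExp_alt (input : String) : String :=
  match pvFirstDigitIdx input.toList with
  | some i => String.ofList (input.toList.take i ++ '#' :: input.toList.drop (i + 1))
  | none => input

-- ===== PRECONDITION & SPEC =====
def Spec_replaceAllDigitsRegExp (input : String) (out : String) : Prop := out = replaceAllDigitsRegExp_alt input
instance (input : String) (out : String) : Decidable (Spec_replaceAllDigitsRegExp input out) := by unfold Spec_replaceAllDigitsRegExp; infer_instance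

-- ===== CLAIM (what is proved, stated in full; the proofs are below) =====
def Claim_equal_replaceAllDigitsRegExp : Prop := ∀ (input : String), Dom_replaceAllDigitsRegExp input → Spec_replaceAllDigitsRegExp input (replaceAllDigitsRegExp input)

-- ===== LEMMAS AND PROOFS =====

lemma foldlA_true (cs : List Char) (r : List Char) :
    cs.foldl pvStepA (r, true) = (r ++ cs, true) := by
  induction cs generalizing r with
  | nil => simp
  | cons c cs ih => simp [pvStepA, ih]

lemma foldlA_false (cs : List Char) (r : List Char) :
    (cs.foldl pvStepA (r, false)).1 =
      r ++ (match pvFirstDigitIdx cs with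
            | some i => cs.take i ++ '#' :: cs.drop (i + 1)
            | none => cs) := by
  induction cs generalizing r with
  | nil => simp [pvFirstDigitIdx]
  | cons c cs ih =>
    by_cases h : '0' ≤ c ∧ c ≤ '9'
    · simp [pvStepA, pvFirstDigitIdx, h, foldlA_true]
    · rcases hf : pvFirstDigitIdx cs with _ | i <;>
        simp [pvStepA, pvFirstDigitIdx, h, hf, ih]

-- ===== VERDICT (by name: the statement is the Claim_ definition above) =====
theorem replaceAllDigitsRegExp_spec : Claim_equal_replaceAllDigitsRegExp := by
  intro input _
  show replaceAllDigitsRegExp input = replaceAllDigitsRegExp_alt input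
  unfold replaceAllDigitsRegExp replaceAllDigitsRegExp_alt
  rcases hf : pvFirstDigitIdx input.toList with _ | i <;>
    simp [foldlA_false, hf, String.ofList_toList]
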